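-- pv_equiv track=rewrite | github.com/SeyoungKimLab/Ornaments | create_personalized_transcriptome.py | get_insertion_end_adjustment
-- ===== SOURCE A (Python) =====
-- def get_insertion_end_adjustment(seq, pos, indel):
--   rel_area = seq[pos-len(indel)+1:pos+1]
--   num_shift = 0
--   for i in range(len(rel_area)):
--     if rel_area[len(rel_area) - i - 1] == indel[len(indel) - i - 1]:
--       num_shift += 1
--     else:
--       break
--   return num_shift
-- ===== SOURCE B (Python) =====
-- def get_insertion_end_adjustment(seq, pos, indel):
--     rel_area = seq[pos-len(indel)+1:pos+1]
--
--     def common_prefix_len(x, y):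
--         if x and y and x[0] == y[0]:
--             return 1 + common_prefix_len(x[1:], y[1:])
--         return 0
--
--     return common_prefix_len(rel_area[::-1], indel[::-1])
-- ===== Notes on version B (the rewrite author's own statement) =====
-- stated objective: simpler
-- what changed: Replaced the indexed right-to-left counting loop (with its len-i-1 arithmetic into both strings) by reversing both strings and recursively computing the length of their common prefix.
import Mathlib
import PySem

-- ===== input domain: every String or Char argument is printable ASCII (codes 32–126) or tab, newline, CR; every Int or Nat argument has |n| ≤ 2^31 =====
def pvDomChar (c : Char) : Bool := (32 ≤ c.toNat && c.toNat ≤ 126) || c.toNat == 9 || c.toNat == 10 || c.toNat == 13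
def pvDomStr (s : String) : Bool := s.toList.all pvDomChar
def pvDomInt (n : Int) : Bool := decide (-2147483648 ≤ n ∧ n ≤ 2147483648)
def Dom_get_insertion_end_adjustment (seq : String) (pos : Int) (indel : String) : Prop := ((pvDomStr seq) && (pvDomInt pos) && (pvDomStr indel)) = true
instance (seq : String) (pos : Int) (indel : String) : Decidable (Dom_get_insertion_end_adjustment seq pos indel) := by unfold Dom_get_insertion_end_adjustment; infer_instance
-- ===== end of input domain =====

-- B replaces A's indexed right-to-left counting loop by reversing both strings and
-- recursively taking the length of their common prefix (objective: simpler).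


-- ===== PORT A =====
-- 'for i in range(len(rel_area)): … else: break' as structural recursion on i;
-- the out-of-range pyGet? branch is unreachable (rel_area is never longer than indel).
def pvALoop (rel indel : List Char) (i : Nat) (num : Int) : Int :=
  if i < rel.length then
    match PySem.List.pyGet? rel ((rel.length : Int) - (i : Int) - 1),
          PySem.List.pyGet? indel ((indel.length : Int) - (i : Int) - 1) with
    | some a, some b => if a = b then pvALoop rel indel (i + 1) (num + 1) else num
    | _, _ => num
  else num
termination_by rel.length - i

def get_insertion_end_adjustment (seq : String) (pos : Int) (indel : String) : Int :=
  let indelL := indel.toList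
  let rel_area := PySem.List.slice seq.toList (some (pos - (indelL.length : Int) + 1)) (some (pos + 1))
  pvALoop rel_area indelL 0 0

-- ===== PORT B =====
def pvCommonPrefixLen : List Char → List Char → Int
  | a :: as, b :: bs => if a = b then 1 + pvCommonPrefixLen as bs else 0
  | _, _ => 0

def get_insertion_end_adjustment_alt (seq : String) (pos : Int) (indel : String) : Int :=
  let indelL := indel.toList
  let rel_area := PySem.List.slice seq.toList (some (pos - (indelL.length : Int) + 1)) (some (pos + 1))
  pvCommonPrefixLen rel_area.reverse indelL.reverse

-- ===== PRECONDITION & SPEC =====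
def Spec_get_insertion_end_adjustment (seq : String) (pos : Int) (indel : String) (out : Int) : Prop := out = get_insertion_end_adjustment_alt seq pos indel
instance (seq : String) (pos : Int) (indel : String) (out : Int) : Decidable (Spec_get_insertion_end_adjustment seq pos indel out) := by unfold Spec_get_insertion_end_adjustment; infer_instance

-- ===== CLAIM (what is proved, stated in full; the proofs are below) =====
def Claim_equal_get_insertion_end_adjustment : Prop := ∀ (seq : String) (pos : Int) (indel : String), Dom_get_insertion_end_adjustment seq pos indel → Spec_get_insertion_end_adjustment seq pos indel (get_insertion_end_adjustment seq pos indel)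

-- ===== LEMMAS AND PROOFS =====

lemma pv_clampIdx_add_le (n : Nat) (a : Int) (L : Nat) :
    PySem.List.clampIdx n (a + L) ≤ PySem.List.clampIdx n a + L := by
  unfold PySem.List.clampIdx
  split_ifs <;> omega

lemma pv_slice_len_le {α : Type} (xs : List α) (pos : Int) (L : Nat) :
    (PySem.List.slice xs (some (pos - L + 1)) (some (pos + 1))).length ≤ L := by
  rw [PySem.List.length_slice]
  have h := pv_clampIdx_add_le xs.length (pos - L + 1) L
  have : pos - (L : Int) + 1 + L = pos + 1 := by ring
  rw [this] at h
  omega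

lemma pv_get_back (xs : List Char) (i : Nat) (hi : i < xs.length) :
    PySem.List.pyGet? xs ((xs.length : Int) - (i : Int) - 1)
      = some (xs.reverse[i]'(by simpa using hi)) := by
  have hcast : ((xs.length : Int) - (i : Int) - 1) = ((xs.length - 1 - i : Nat) : Int) := by omega
  rw [hcast, PySem.List.pyGet?_natCast, List.getElem?_eq_getElem (by omega)]
  exact congrArg some (List.getElem_reverse _).symm

lemma pv_loop_eq_cpl (rel indel : List Char) (h : rel.length ≤ indel.length)
    (i : Nat) (num : Int) :
    pvALoop rel indel i num = num + pvCommonPrefixLen (rel.reverse.drop i) (indel.reverse.drop i) := by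
  induction i, num using pvALoop.induct rel indel with
  | case1 i num hlt b hb ha ih =>
    have hii : i < indel.length := lt_of_lt_of_le hlt h
    have hri : i < rel.reverse.length := by simpa using hlt
    have hdi : i < indel.reverse.length := by simpa using hii
    have har : rel.reverse[i] = b := by
      have := pv_get_back rel i hlt; rw [ha] at this; exact (Option.some.inj this).symm
    have hai : indel.reverse[i] = b := by
      have := pv_get_back indel i hii; rw [hb] at this; exact (Option.some.inj this).symm
    rw [pvALoop, if_pos hlt, ha, hb]
    change (if b = b then pvALoop rel indel (i + 1) (num + 1) else num) = _
    rw [if_pos rfl, ih, List.drop_eq_getElem_cons hri, List.drop_eq_getElem_cons hdi, har, hai]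
    rw [show pvCommonPrefixLen (b :: List.drop (i + 1) rel.reverse) (b :: List.drop (i + 1) indel.reverse)
        = 1 + pvCommonPrefixLen (List.drop (i + 1) rel.reverse) (List.drop (i + 1) indel.reverse)
      from by simp [pvCommonPrefixLen]]
    ring
  | case2 i num hlt a b hb ha hab =>
    have hii : i < indel.length := lt_of_lt_of_le hlt h
    have hri : i < rel.reverse.length := by simpa using hlt
    have hdi : i < indel.reverse.length := by simpa using hii
    have har : rel.reverse[i] = a := by
      have := pv_get_back rel i hlt; rw [ha] at this; exact (Option.some.inj this).symm
    have hai : indel.reverse[i] = b := by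
      have := pv_get_back indel i hii; rw [hb] at this; exact (Option.some.inj this).symm
    rw [pvALoop, if_pos hlt, ha, hb]
    change (if a = b then pvALoop rel indel (i + 1) (num + 1) else num) = _
    rw [if_neg hab, List.drop_eq_getElem_cons hri, List.drop_eq_getElem_cons hdi, har, hai]
    rw [show pvCommonPrefixLen (a :: List.drop (i + 1) rel.reverse) (b :: List.drop (i + 1) indel.reverse)
        = 0 from by simp [pvCommonPrefixLen, hab]]
    ring
  | case3 i num hlt hfalse =>
    exact absurd (pv_get_back indel i (lt_of_lt_of_le hlt h)) (fun hb =>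
      hfalse _ _ (pv_get_back rel i hlt) hb)
  | case4 i num hge =>
    rw [pvALoop, if_neg hge, List.drop_eq_nil_of_le (by simpa using Nat.le_of_not_lt hge)]
    simp [pvCommonPrefixLen]

theorem get_insertion_end_adjustment_agree (seq : String) (pos : Int) (indel : String) :
    get_insertion_end_adjustment seq pos indel = get_insertion_end_adjustment_alt seq pos indel := by
  unfold get_insertion_end_adjustment get_insertion_end_adjustment_alt
  have h := pv_slice_len_le seq.toList pos indel.toList.length
  simpa using pv_loop_eq_cpl _ indel.toList h 0 0

-- ===== VERDICT (by name: the statement is the Claim_ definition above) =====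
theorem get_insertion_end_adjustment_spec : Claim_equal_get_insertion_end_adjustment := by
  intro seq pos indel _
  exact get_insertion_end_adjustment_agree seq pos indel
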